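-- pv_equiv track=rewrite | github.com/carlskeide/advent-of-code | src/aoc2023/task09.py | fill_recursive
-- ===== SOURCE A (Python) =====
-- def fill_recursive(stack: list[list[int]]) -> list[int]:
--     delta = stack.pop()[-1]
--     series = stack[-1]
--     series.append(series[-1] + delta)
--     if len(stack) == 1:
--         return series
--     else:
--         return fill_recursive(stack)
-- ===== SOURCE B (Python) =====
-- def fill_recursive(stack: list[list[int]]) -> list[int]:
--     # Closed form: the final series is the first one with the sum of all
--     # lists' last elements appended (each level adds the last of the level
--     # below, so the appended value telescopes to the total).
--     return stack[0] + [sum(s[-1] for s in stack)]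
-- ===== Notes on version B (the rewrite author's own statement) =====
-- stated objective: simpler
-- what changed: Replaces the destructive tail recursion that repeatedly pops the stack and appends to the next series with a one-line closed form: the result is the first series plus the sum of every series' last element (the propagated delta telescopes); Pre_ excludes stacks of length < 2 or containing an empty list, on which A raises IndexError. Equivalence is about the return value only: A mutates the stack and its inner lists, B does not.
import Mathlib
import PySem

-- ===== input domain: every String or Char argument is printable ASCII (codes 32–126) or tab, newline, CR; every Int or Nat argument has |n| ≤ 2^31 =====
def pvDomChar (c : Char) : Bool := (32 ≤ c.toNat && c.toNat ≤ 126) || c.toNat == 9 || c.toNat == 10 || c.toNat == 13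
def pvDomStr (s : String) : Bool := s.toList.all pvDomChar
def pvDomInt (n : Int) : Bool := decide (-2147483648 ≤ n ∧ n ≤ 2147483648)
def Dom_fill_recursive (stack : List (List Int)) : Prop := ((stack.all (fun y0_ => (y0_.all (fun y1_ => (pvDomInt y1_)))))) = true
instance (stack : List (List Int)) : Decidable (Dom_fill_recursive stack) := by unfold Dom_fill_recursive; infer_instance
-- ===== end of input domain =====

-- B replaces A's destructive tail recursion with a one-line closed form (first series
-- plus the telescoped sum of last elements); equivalence is about the RETURN value only —
-- A mutates the stack and its inner lists in place, B does not.

-- ===== PORT A =====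
def fill_recursive (stack : List (List Int)) : List Int :=
  match hs : stack.getLast? with
  | none => []                                  -- stack.pop() raises IndexError (empty stack)
  | some top =>
    let rest := stack.dropLast                  -- state of `stack` after .pop()
    match top.getLast? with
    | none => []                                -- stack.pop()[-1] raises IndexError (empty top)
    | some delta =>                             -- delta = stack.pop()[-1]
      match hr : rest.getLast? with
      | none => []                              -- series = stack[-1] raises IndexError (stack was a singleton)
      | some series =>
        -- series.append(series[-1] + delta); series[-1] raises on an empty series (excluded by Pre_)
        let series' := series ++ [series.getLastD 0 + delta]
        -- the in-place mutation of stack[-1], reflected in the stack passed on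
        let stack' := rest.dropLast ++ [series']
        if rest.length == 1 then series' else fill_recursive stack'
termination_by stack.length
decreasing_by
  have h1 : stack ≠ [] := by intro h; simp [h] at hs
  have h2 : rest ≠ [] := by intro h; simp [h] at hr
  rw [show rest = stack.dropLast from rfl] at h2
  have hp : 0 < stack.length := List.length_pos_iff.mpr h1
  have hq : 0 < stack.dropLast.length := List.length_pos_iff.mpr h2
  have e1 : stack.dropLast.length = stack.length - 1 := List.length_dropLast
  have e2 : stack.dropLast.dropLast.length = stack.dropLast.length - 1 := List.length_dropLast
  simp only [List.length_append, List.length_cons, List.length_nil, e2, e1]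
  omega

-- ===== PORT B =====
def fill_recursive_alt (stack : List (List Int)) : List Int :=
  match stack with
  | [] => []                                    -- stack[0] raises IndexError
  | s0 :: _ =>
    -- stack[0] + [sum(s[-1] for s in stack)]; s[-1] raises on an empty series (excluded by Pre_)
    s0 ++ [(stack.map (fun s => s.getLastD 0)).sum]

-- ===== PRECONDITION & SPEC =====
-- Pre_ excludes exactly the inputs on which A raises IndexError: stacks with fewer than
-- two series (pop / stack[-1] fails) or containing an empty series (s[-1] fails).
def Pre_fill_recursive (stack : List (List Int)) : Prop :=
  2 ≤ stack.length ∧ ∀ s ∈ stack, s ≠ []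
instance (stack : List (List Int)) : Decidable (Pre_fill_recursive stack) := by
  unfold Pre_fill_recursive; infer_instance
def pvWitness_fill_recursive : List (List Int) := [[1, 2], [1]]
def Spec_fill_recursive (stack : List (List Int)) (out : List Int) : Prop := out = fill_recursive_alt stack
instance (stack : List (List Int)) (out : List Int) : Decidable (Spec_fill_recursive stack out) := by unfold Spec_fill_recursive; infer_instance

-- ===== CLAIM (what is proved, stated in full; the proofs are below) =====
def Claim_equal_fill_recursive : Prop := ∀ (stack : List (List Int)), Dom_fill_recursive stack → Pre_fill_recursive stack → Spec_fill_recursive stack (fill_recursive stack)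

-- ===== LEMMAS AND PROOFS =====

lemma fill_recursive_key : ∀ (n : Nat) (stack : List (List Int)), stack.length ≤ n →
    2 ≤ stack.length → (∀ s ∈ stack, s ≠ []) →
    fill_recursive stack = fill_recursive_alt stack := by
  intro n
  induction n with
  | zero => intro stack h h2 _; omega
  | succ n ih =>
    intro stack hlen h2 hne
    have hne' : stack ≠ [] := by intro h; simp [h] at h2
    rw [fill_recursive]
    split
    · next heq => exact absurd (List.getLast?_eq_none_iff.mp heq) hne'
    · next top heq =>
      split
      · next heq2 =>
        have : top ∈ stack := List.mem_of_getLast? heq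
        exact absurd (List.getLast?_eq_none_iff.mp heq2) (hne _ this)
      · next delta heq2 =>
        dsimp only
        split
        · next heq3 =>
          have : stack.dropLast ≠ [] := by
            intro h
            have := List.length_dropLast (xs := stack)
            rw [h] at this; simp at this; omega
          exact absurd (List.getLast?_eq_none_iff.mp heq3) this
        · next series heq3 =>
          obtain ⟨init, rfl⟩ := List.getLast?_eq_some_iff.mp heq
          have hdrop : (init ++ [top]).dropLast = init := List.dropLast_concat ..
          rw [hdrop] at heq3 ⊢
          have hd : top.getLastD 0 = delta := by
            rw [List.getLastD_eq_getLast?, heq2]; rfl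
          obtain ⟨init2, rfl⟩ := List.getLast?_eq_some_iff.mp heq3
          have hdrop2 : (init2 ++ [series]).dropLast = init2 := List.dropLast_concat ..
          rw [hdrop2]
          split
          · next hone =>
            -- len(stack) == 1 after the pop: init2 ++ [series] is a singleton, init2 = []
            have h1 : init2 = [] := by
              have := List.length_append (as := init2) (bs := [series])
              simp only [List.length_cons, List.length_nil] at this
              have hb : (init2 ++ [series]).length = 1 := by
                have := of_decide_eq_true hone
                exact_mod_cast this
              have : init2.length = 0 := by omega
              exact List.length_eq_zero_iff.mp this
            subst h1
            simp [fill_recursive_alt, List.getLastD_eq_getLast?, heq2]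
          · next hone =>
            have hlen2 : 2 ≤ (init2 ++ [series]).length := by
              have hne1 : (init2 ++ [series]).length ≠ 1 := by
                intro h; rw [h] at hone; simp at hone
              simp only [List.length_append, List.length_cons, List.length_nil] at *
              omega
            have hinit2 : init2 ≠ [] := by
              intro h; rw [h] at hlen2; simp at hlen2
            rw [ih (init2 ++ [series ++ [series.getLastD 0 + delta]])
                (by simp_all [List.length_append])
                (by simp_all [List.length_append])
                (by
                  intro s hs'
                  rcases List.mem_append.mp hs' with h | h
                  · exact hne s (by simp [List.mem_append, h])
                  · simp only [List.mem_singleton] at h; subst h; simp)]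
            obtain ⟨s0, rest2, rfl⟩ := List.exists_cons_of_ne_nil hinit2
            simp [fill_recursive_alt, List.getLastD_eq_getLast?, heq2]

-- ===== VERDICT (by name: the statement is the Claim_ definition above) =====
theorem fill_recursive_spec : Claim_equal_fill_recursive := by
  intro stack _ hpre
  unfold Spec_fill_recursive
  exact fill_recursive_key stack.length stack le_rfl hpre.1 hpre.2
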